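-- pv_equiv track=rewrite | github.com/JuneChen9/C_School | TransformerRuns/v3_2/20260120_173154_f3d531c1/make_radar_multibuilding.py | choose_metrics
-- ===== SOURCE A (Python) =====
-- def choose_metrics(per_building: dict, preferred: list[str]) -> list[str]:
--     # Keep only metrics that exist for at least one building
--     available = set()
--     for b, md in per_building.items():
--         available |= set(md.keys())
--     chosen = [m for m in preferred if m in available]
--     # If none found, fall back to whatever exists (stable order)
--     if not chosen:
--         chosen = sorted(list(available))
--     return chosen
-- ===== SOURCE B (Python) =====
-- def choose_metrics(per_building: dict, preferred: list[str]) -> list[str]: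
--     # Filter preferred directly: a metric is kept if any building's dict has it.
--     chosen = [m for m in preferred if any(m in md for md in per_building.values())]
--     if not chosen:
--         # Fallback: union of all keys, sorted.
--         available = set()
--         for md in per_building.values():
--             available.update(md.keys())
--         chosen = sorted(available)
--     return chosen
-- ===== Notes on version B (the rewrite author's own statement) =====
-- stated objective: idiomatic
-- what changed: B filters preferred with short-circuit any-membership scans over the building dicts instead of pre-building a union set; the union set is built lazily only in the empty-result fallback.
import Mathlib
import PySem

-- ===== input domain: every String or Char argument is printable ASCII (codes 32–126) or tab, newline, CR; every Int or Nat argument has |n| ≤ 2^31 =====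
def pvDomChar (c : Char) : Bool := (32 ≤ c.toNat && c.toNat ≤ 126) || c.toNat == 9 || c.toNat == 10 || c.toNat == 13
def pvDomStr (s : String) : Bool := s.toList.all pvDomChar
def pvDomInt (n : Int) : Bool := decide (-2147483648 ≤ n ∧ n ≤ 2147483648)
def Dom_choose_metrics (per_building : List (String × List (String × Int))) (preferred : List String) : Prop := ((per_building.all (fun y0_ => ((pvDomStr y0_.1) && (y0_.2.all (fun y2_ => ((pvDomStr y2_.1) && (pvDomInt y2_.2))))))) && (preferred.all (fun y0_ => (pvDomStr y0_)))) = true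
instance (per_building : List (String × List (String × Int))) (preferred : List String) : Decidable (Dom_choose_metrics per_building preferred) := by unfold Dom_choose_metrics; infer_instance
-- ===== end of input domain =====

-- B filters preferred with short-circuit any-membership scans over the building dicts instead of
-- pre-building a union set; the union set is built lazily only in the empty-result fallback (idiomatic, not faster).

-- ===== PORT A =====
-- available = set(); for b, md in per_building.items(): available |= set(md.keys())
def pvAvailA (per_building : List (String × List (String × Int))) : PySem.Set String :=
  per_building.foldl (fun s bm => PySem.Set.union s (bm.2.map Prod.fst)) PySem.Set.empty

def choose_metrics (per_building : List (String × List (String × Int))) (preferred : List String) : List String :=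
  let available := pvAvailA per_building
  let chosen := preferred.filter (fun m => PySem.Set.contains available m)
  if chosen = [] then PySem.List.sorted available (fun x => x) false else chosen

-- ===== PORT B =====
-- chosen = [m for m in preferred if any(m in md for md in per_building.values())]
-- fallback: available = set(); for md in values: available.update(md.keys()); sorted(available)
def choose_metrics_alt (per_building : List (String × List (String × Int))) (preferred : List String) : List String :=
  let chosen := preferred.filter (fun m => per_building.any (fun bm => bm.2.any (fun kv => kv.1 == m)))
  if chosen = [] then
    let available := per_building.foldl (fun s bm => PySem.Set.update s (bm.2.map Prod.fst)) PySem.Set.empty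
    PySem.List.sorted available (fun x => x) false
  else chosen

-- ===== PRECONDITION & SPEC =====
def Spec_choose_metrics (per_building : List (String × List (String × Int))) (preferred : List String) (out : List String) : Prop := out = choose_metrics_alt per_building preferred
instance (per_building : List (String × List (String × Int))) (preferred : List String) (out : List String) : Decidable (Spec_choose_metrics per_building preferred out) := by unfold Spec_choose_metrics; infer_instance

-- ===== CLAIM (what is proved, stated in full; the proofs are below) =====
def Claim_equal_choose_metrics : Prop := ∀ (per_building : List (String × List (String × Int))) (preferred : List String), Dom_choose_metrics per_building preferred → Spec_choose_metrics per_building preferred (choose_metrics per_building preferred)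

-- ===== LEMMAS AND PROOFS =====

-- membership in the accumulated union set
theorem mem_pvAvailA_aux (l : List (String × List (String × Int))) (s : PySem.Set String) (m : String) :
    m ∈ l.foldl (fun s bm => PySem.Set.union s (bm.2.map Prod.fst)) s ↔
      m ∈ s ∨ ∃ bm ∈ l, ∃ kv ∈ bm.2, kv.1 = m := by
  induction l generalizing s with
  | nil => simp
  | cons h t ih =>
    simp only [List.foldl_cons, ih, PySem.Set.mem_union, List.mem_map, List.mem_cons]
    constructor
    · rintro (⟨hs | ⟨kv, hkv, rfl⟩⟩ | ⟨bm, hbm, kv, hkv, rfl⟩)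
      · exact Or.inl hs
      · exact Or.inr ⟨h, Or.inl rfl, kv, hkv, rfl⟩
      · exact Or.inr ⟨bm, Or.inr hbm, kv, hkv, rfl⟩
    · rintro (hs | ⟨bm, hbm | hbm, kv, hkv, rfl⟩)
      · exact Or.inl (Or.inl hs)
      · exact Or.inl (Or.inr ⟨kv, (hbm ▸ hkv), rfl⟩)
      · exact Or.inr ⟨bm, hbm, kv, hkv, rfl⟩

theorem pred_eq (per_building : List (String × List (String × Int))) (m : String) :
    PySem.Set.contains (pvAvailA per_building) m =
      per_building.any (fun bm => bm.2.any (fun kv => kv.1 == m)) := by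
  rw [Bool.eq_iff_iff, PySem.Set.contains_iff, List.any_eq_true]
  unfold pvAvailA
  rw [mem_pvAvailA_aux per_building PySem.Set.empty m]
  constructor
  · rintro (h0 | ⟨bm, hbm, kv, hkv, rfl⟩)
    · simp [PySem.Set.empty] at h0
    · exact ⟨bm, hbm, List.any_eq_true.2 ⟨kv, hkv, by simp⟩⟩
  · rintro ⟨bm, hbm, hin⟩
    obtain ⟨kv, hkv, hb⟩ := List.any_eq_true.1 hin
    exact Or.inr ⟨bm, hbm, kv, hkv, by simpa using hb⟩

theorem avail_eq (per_building : List (String × List (String × Int))) :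
    pvAvailA per_building =
      per_building.foldl (fun s bm => PySem.Set.update s (bm.2.map Prod.fst)) PySem.Set.empty := rfl

-- ===== VERDICT (by name: the statement is the Claim_ definition above) =====
theorem choose_metrics_spec : Claim_equal_choose_metrics := by
  intro per_building preferred _
  unfold Spec_choose_metrics choose_metrics choose_metrics_alt
  simp only [← avail_eq]
  have hf : preferred.filter (fun m => PySem.Set.contains (pvAvailA per_building) m) =
      preferred.filter (fun m => per_building.any (fun bm => bm.2.any (fun kv => kv.1 == m))) := by
    apply List.filter_congr
    intro m _
    exact pred_eq per_building m
  rw [hf]
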